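-- pv_equiv track=rewrite | github.com/Okada-hiro/Run-Pod | f0_controler.py | align_phonemes_to_accent
-- ===== SOURCE A (Python) =====
-- MORA_CONSUMING_PHONEMES = set(['a', 'i', 'u', 'e', 'o', 'N', 'cl'])
--
-- PAUSES = set(['pau', 'sil', 'sp'])
--
-- def align_phonemes_to_accent(phonemes, accent_hl_list):
--     """
--     音素リスト(phonemes) と モーラ単位H/Lリスト(accent_hl_list) を同期させる。
--
--     Args:
--         phonemes: list of str (例: ['k', 'o', 'N', 'n', 'i', 'c', 'h', 'i', 'w', 'a'])
--         accent_hl_list: list of str (例: ['L', 'H', 'H', 'H', 'L']) from MeCab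
--     Returns:
--         phoneme_hl_map: 音素ごとのH/Lリスト (例: ['L', 'L', 'H', 'H', ...])
--     """
--     phoneme_hl_map = []
--     mora_index = 0
--
--     # 安全策：アクセント情報が空の場合は全部Lにする
--     if not accent_hl_list:
--         return ["L"] * len(phonemes)
--
--     for ph in phonemes:
--         # 1. ポーズの場合: 強制的にLow (または無音扱い) にして、モーラは進めない
--         if ph in PAUSES:
--             phoneme_hl_map.append("L")
--             continue
--
--         # 2. 現在のアクセントを取得
--         # (MeCabの解析ズレなどでインデックスを超えた場合は、最後の値を維持する安全策)
--         if mora_index < len(accent_hl_list):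
--             current_acc = accent_hl_list[mora_index]
--         else:
--             current_acc = accent_hl_list[-1]
--
--         phoneme_hl_map.append(current_acc)
--
--         # 3. モーラを消化する音素（母音・ん・っ）なら、インデックスを進める
--         if ph in MORA_CONSUMING_PHONEMES:
--             mora_index += 1
--
--     return phoneme_hl_map
-- ===== SOURCE B (Python) =====
-- MORA_CONSUMING_PHONEMES = set(['a', 'i', 'u', 'e', 'o', 'N', 'cl'])
-- PAUSES = set(['pau', 'sil', 'sp'])
--
-- def align_phonemes_to_accent(phonemes, accent_hl_list):
--     if not accent_hl_list:
--         return ["L"] * len(phonemes)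
--     # Stage 1: partition the phonemes into mora segments, each segment ending
--     # right after a mora-consuming phoneme, plus one trailing segment.
--     segments = []
--     cur = []
--     for ph in phonemes:
--         cur.append(ph)
--         if ph in MORA_CONSUMING_PHONEMES:
--             segments.append(cur)
--             cur = []
--     segments.append(cur)
--     # Stage 2: segment i carries the i-th accent label (clamped to the last);
--     # pauses always emit 'L'.
--     last = len(accent_hl_list) - 1
--     return ["L" if ph in PAUSES else accent_hl_list[min(i, last)]
--             for i, seg in enumerate(segments) for ph in seg]
-- ===== Notes on version B (the rewrite author's own statement) =====
-- stated objective: alternative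
-- what changed: B inverts the traversal: it first partitions the phonemes into mora segments (each ending right after a mora-consuming phoneme, plus a trailing segment) and then labels whole segments by their position in the accent list (clamped to the last label, pauses forced to 'L'), instead of A's single pass carrying a mutable mora counter per phoneme.
import Mathlib
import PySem

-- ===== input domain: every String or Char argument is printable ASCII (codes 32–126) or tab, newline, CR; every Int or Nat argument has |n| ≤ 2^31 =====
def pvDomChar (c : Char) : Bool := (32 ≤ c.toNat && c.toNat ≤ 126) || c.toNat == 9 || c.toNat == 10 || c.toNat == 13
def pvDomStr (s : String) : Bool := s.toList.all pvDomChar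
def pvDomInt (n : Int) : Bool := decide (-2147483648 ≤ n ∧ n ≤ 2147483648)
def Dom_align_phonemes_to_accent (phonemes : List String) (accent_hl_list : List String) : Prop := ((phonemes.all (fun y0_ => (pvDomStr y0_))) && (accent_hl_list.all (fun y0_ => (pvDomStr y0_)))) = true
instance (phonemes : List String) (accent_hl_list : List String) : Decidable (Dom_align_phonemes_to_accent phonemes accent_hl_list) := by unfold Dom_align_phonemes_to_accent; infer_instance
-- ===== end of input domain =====

-- ===== PORT A =====
-- B partitions the phonemes into mora segments first and labels whole segments; same values, same cost.
def pvPauses : List String := ["pau", "sil", "sp"]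
def pvMora : List String := ["a", "i", "u", "e", "o", "N", "cl"]

-- the for-loop of A, carrying mora_index; accent_hl_list[mora_index] is in range in the
-- true branch and accent_hl_list[-1] is element len-1 (list nonempty there), so getD is exact
def alignLoopA (accent : List String) : List String → Nat → List String
  | [], _ => []
  | ph :: rest, mi =>
    if pvPauses.contains ph then
      "L" :: alignLoopA accent rest mi
    else
      (if mi < accent.length then accent.getD mi "" else accent.getD (accent.length - 1) "") ::
        alignLoopA accent rest (if pvMora.contains ph then mi + 1 else mi)

def align_phonemes_to_accent (phonemes : List String) (accent_hl_list : List String) : List String :=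
  if accent_hl_list.isEmpty then List.replicate phonemes.length "L"
  else alignLoopA accent_hl_list phonemes 0

-- ===== PORT B =====
-- stage 1 of Source B: the (segments, cur) loop, then segments.append(cur)
def segsOf (phonemes : List String) : List (List String) :=
  let st := phonemes.foldl
    (fun (st : List (List String) × List String) ph =>
      let cur := st.2 ++ [ph]
      if pvMora.contains ph then (st.1 ++ [cur], []) else (st.1, cur))
    ([], [])
  st.1 ++ [st.2]

def align_phonemes_to_accent_alt (phonemes : List String) (accent_hl_list : List String) : List String :=
  if accent_hl_list.isEmpty then List.replicate phonemes.length "L"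
  else
    let last := accent_hl_list.length - 1
    (PySem.List.enumerate (segsOf phonemes) 0).flatMap
      (fun iseg => iseg.2.map (fun ph =>
        if pvPauses.contains ph then "L" else accent_hl_list.getD (min iseg.1.toNat last) ""))

-- ===== PRECONDITION & SPEC =====
def Spec_align_phonemes_to_accent (phonemes : List String) (accent_hl_list : List String) (out : List String) : Prop := out = align_phonemes_to_accent_alt phonemes accent_hl_list
instance (phonemes : List String) (accent_hl_list : List String) (out : List String) : Decidable (Spec_align_phonemes_to_accent phonemes accent_hl_list out) := by unfold Spec_align_phonemes_to_accent; infer_instance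

-- ===== CLAIM (what is proved, stated in full; the proofs are below) =====
def Claim_equal_align_phonemes_to_accent : Prop := ∀ (phonemes : List String) (accent_hl_list : List String), Dom_align_phonemes_to_accent phonemes accent_hl_list → Spec_align_phonemes_to_accent phonemes accent_hl_list (align_phonemes_to_accent phonemes accent_hl_list)

-- ===== LEMMAS AND PROOFS =====

-- recursive characterisation of segsOf (proof helper)
def consHead (cur : List String) : List (List String) → List (List String)
  | [] => [cur]
  | s :: ss => (cur ++ s) :: ss

def segsRec : List String → List (List String)
  | [] => [[]]
  | ph :: rest =>
    if pvMora.contains ph then [ph] :: segsRec rest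
    else consHead [ph] (segsRec rest)

-- stage-2 emission, indexed
def emitSegs (accent : List String) : List (List String) → Nat → List String
  | [], _ => []
  | seg :: rest, i =>
    seg.map (fun ph => if pvPauses.contains ph then "L"
                       else accent.getD (min i (accent.length - 1)) "") ++
      emitSegs accent rest (i + 1)

theorem pause_not_mora (s : String) (h : s ∈ pvPauses) : s ∉ pvMora := by
  have hm : s = "pau" ∨ s = "sil" ∨ s = "sp" := by simpa [pvPauses] using h
  rcases hm with h | h | h <;> subst h <;> decide

theorem segsRec_ne_nil (phs : List String) : segsRec phs ≠ [] := by
  cases phs with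
  | nil => simp [segsRec]
  | cons ph rest =>
    simp only [segsRec]
    split
    · simp
    · cases h : segsRec rest <;> simp [consHead]

theorem consHead_consHead (cur x : List String) (L : List (List String)) :
    consHead cur (consHead x L) = consHead (cur ++ x) L := by
  cases L <;> simp [consHead]

theorem segsOf_foldl :
    ∀ (phs : List String) (segs : List (List String)) (cur : List String),
      (let r := phs.foldl
          (fun (st : List (List String) × List String) ph =>
            let cur := st.2 ++ [ph]
            if pvMora.contains ph then (st.1 ++ [cur], []) else (st.1, cur))
          (segs, cur);
        r.1 ++ [r.2]) = segs ++ consHead cur (segsRec phs)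
  | [], segs, cur => by simp [segsRec, consHead]
  | ph :: rest, segs, cur => by
    simp only [List.foldl_cons, segsRec]
    by_cases hm : pvMora.contains ph = true
    · have := segsOf_foldl rest (segs ++ [cur ++ [ph]]) []
      simp only [hm, if_true]
      rw [this]
      cases h : segsRec rest with
      | nil => exact absurd h (segsRec_ne_nil rest)
      | cons s ss => simp [consHead, h]
    · have := segsOf_foldl rest segs (cur ++ [ph])
      simp only [Bool.not_eq_true] at hm
      simp only [hm, Bool.false_eq_true, if_false]
      rw [this, ← consHead_consHead]

theorem segsOf_eq (phs : List String) : segsOf phs = segsRec phs := by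
  have h := segsOf_foldl phs [] []
  cases hs : segsRec phs with
  | nil => exact absurd hs (segsRec_ne_nil phs)
  | cons s ss => simpa [segsOf, hs, consHead] using h

theorem flatMap_enumerate_eq (accent : List String) :
    ∀ (segs : List (List String)) (k : Nat),
      (PySem.List.enumerate segs (k : Int)).flatMap
        (fun iseg => iseg.2.map (fun ph =>
          if pvPauses.contains ph then "L"
          else accent.getD (min iseg.1.toNat (accent.length - 1)) "")) =
      emitSegs accent segs k
  | [], k => by simp [PySem.List.enumerate_nil, emitSegs]
  | seg :: rest, k => by
    rw [PySem.List.enumerate_cons]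
    have h1 : ((k : Int) + 1) = ((k + 1 : Nat) : Int) := by push_cast; ring
    simp only [List.flatMap_cons, h1, flatMap_enumerate_eq accent rest (k + 1), emitSegs,
      Int.toNat_natCast]

theorem alignLoop_eq_emit (accent : List String) :
    ∀ (phs : List String) (mi : Nat),
      alignLoopA accent phs mi = emitSegs accent (segsRec phs) mi
  | [], mi => by simp [alignLoopA, segsRec, emitSegs]
  | ph :: rest, mi => by
    have hcur : (if mi < accent.length then accent.getD mi "" else accent.getD (accent.length - 1) "")
        = accent.getD (min mi (accent.length - 1)) "" := by
      by_cases hlt : mi < accent.length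
      · have h2 : min mi (accent.length - 1) = mi := by omega
        simp [hlt, h2]
      · have h2 : min mi (accent.length - 1) = accent.length - 1 := by omega
        simp [hlt, h2]
    simp only [List.getD_eq_getElem?_getD] at hcur
    by_cases hp : ph ∈ pvPauses
    · have hp' : pvPauses.contains ph = true := by simpa [List.contains_eq_mem] using hp
      have hm' : pvMora.contains ph = false := by
        simpa [List.contains_eq_mem] using pause_not_mora ph hp
      cases h : segsRec rest with
      | nil => exact absurd h (segsRec_ne_nil rest)
      | cons s ss =>
        simp only [alignLoopA, segsRec, hp', hm', Bool.false_eq_true, if_true, if_false, h,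
          consHead, List.nil_append, emitSegs, List.map_cons, List.cons_append]
        rw [alignLoop_eq_emit accent rest mi, h]
        simp [emitSegs, hp']
    · have hp' : pvPauses.contains ph = false := by simpa [List.contains_eq_mem] using hp
      by_cases hmo : ph ∈ pvMora
      · have hm' : pvMora.contains ph = true := by simpa [List.contains_eq_mem] using hmo
        simp only [alignLoopA, segsRec, hp', hm', Bool.false_eq_true, if_true, if_false,
          emitSegs, List.map_cons, List.map_nil, List.nil_append, List.cons_append]
        rw [alignLoop_eq_emit accent rest (mi + 1)]
        simp [hp', hcur]
      · have hm' : pvMora.contains ph = false := by simpa [List.contains_eq_mem] using hmo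
        cases h : segsRec rest with
        | nil => exact absurd h (segsRec_ne_nil rest)
        | cons s ss =>
          simp only [alignLoopA, segsRec, hp', hm', Bool.false_eq_true, if_false, h,
            consHead, List.nil_append, emitSegs, List.map_cons, List.cons_append]
          rw [alignLoop_eq_emit accent rest mi, h]
          simp [emitSegs, hp', hcur]

-- ===== VERDICT (by name: the statement is the Claim_ definition above) =====
theorem align_phonemes_to_accent_spec : Claim_equal_align_phonemes_to_accent := by
  intro phonemes accent _
  unfold Spec_align_phonemes_to_accent align_phonemes_to_accent align_phonemes_to_accent_alt
  by_cases h : accent.isEmpty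
  · simp [h]
  · simp only [h, Bool.false_eq_true, if_false, segsOf_eq]
    rw [show (0 : Int) = ((0 : Nat) : Int) from rfl, flatMap_enumerate_eq]
    exact alignLoop_eq_emit accent phonemes 0
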